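-- pv_equiv track=rewrite | github.com/unabl4/codefights | string_chain_replacements/string_chain_replacements.py | stringChainReplacements
-- ===== SOURCE A (Python) =====
-- def stringChainReplacements(s):
--     c = 0 # counter
--     n = len(s) # len
--     if n <= 1:
--         return 0 # no changes possible
--
--     i,j = 0,1 # word pointers
--     f = {} # freq dictionary
--     while j < n:
--         if len(s[i]) > 1 and len(s[j]) > 1:
--             # regular, easy case
--             c += s[i][-1] != s[j][0]
--
--             i += 1
--             j += 1
--         else:
--             # not so easy case
--             f[s[i][-1]] = 1
--
--             # continue collecting single-char
--             while j+1 < n and len(s[j]) <= 1: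
--                 f[s[j][0]] = f.get(s[j][0], 0) + 1 # increment
--                 j += 1
--
--             f[s[j][0]] = f.get(s[j][0],0)+1 # increment
--             c += (j-i+1)-max(f.values())
--             f.clear() # done
--
--             # move on
--             i = j
--             j += 1
--
--     return c
-- ===== SOURCE B (Python) =====
-- def stringChainReplacements(s):
--     n = len(s)
--     res = [0] * n  # res[i] = replacements needed for the suffix chain s[i:]
--     for i in reversed(range(n - 1)):
--         if len(s[i]) > 1 and len(s[i + 1]) > 1:
--             res[i] = (s[i][-1] != s[i + 1][0]) + res[i + 1]
--         else:
--             k = i + 1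
--             while k + 1 < n and len(s[k]) <= 1:
--                 k += 1
--             chars = [s[i][-1]] + [w[0] for w in s[i + 1:k + 1]]
--             res[i] = len(chars) - max(chars.count(c) for c in set(chars)) + res[k]
--     return res[0] if s else 0
-- ===== Notes on version B (the rewrite author's own statement) =====
-- stated objective: alternative
-- what changed: A's forward two-pointer while-loop with a mutable frequency dict is replaced by dynamic programming over suffixes: B fills a table res (res[i] = answer for s[i:]) back to front, scoring a group by max over the distinct characters (a set) of their list counts, and returns res[0].
import Mathlib
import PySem

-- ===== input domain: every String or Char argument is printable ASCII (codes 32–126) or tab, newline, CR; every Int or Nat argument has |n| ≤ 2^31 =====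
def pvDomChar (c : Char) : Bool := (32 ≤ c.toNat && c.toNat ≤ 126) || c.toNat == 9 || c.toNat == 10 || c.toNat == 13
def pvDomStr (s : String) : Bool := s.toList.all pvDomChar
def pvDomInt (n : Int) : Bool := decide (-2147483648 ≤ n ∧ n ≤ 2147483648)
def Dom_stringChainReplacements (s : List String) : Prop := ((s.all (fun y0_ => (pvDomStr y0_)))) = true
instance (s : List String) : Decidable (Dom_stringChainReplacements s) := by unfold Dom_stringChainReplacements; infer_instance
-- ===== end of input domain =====

-- B replaces A's forward two-pointer loop + mutable frequency dict with a back-to-front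
-- dynamic-programming table over suffixes (res[i] = answer for s[i:], filled right to left,
-- groups scored via set-of-chars counts); objective: alternative algorithm, same observable results.

-- ===== PORT A =====
-- char/word access helpers shared by both ports (s[i], w[0], w[-1], len(w))
def pvLen (w : String) : Int := PySem.Str.len w
def pvLast (w : String) : Char := (PySem.Str.pyGet? w (-1)).getD ' '
def pvFirst (w : String) : Char := (PySem.Str.pyGet? w 0).getD ' '
def pvWord (s : List String) (i : Int) : String := PySem.List.pyGetD s i ""

-- inner 'while j+1 < n and len(s[j]) <= 1' collecting loop of A
-- (fuel only guards totality; it is never exhausted when fuel ≥ n - j)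
def pvA_collect (s : List String) (n : Int) :
    Nat → Int → PySem.Dict Char Int → Int × PySem.Dict Char Int
  | 0, j, f => (j, f)
  | fuel + 1, j, f =>
    if j + 1 < n ∧ pvLen (pvWord s j) ≤ 1 then
      pvA_collect s n fuel (j + 1)
        (f.insert (pvFirst (pvWord s j)) (f.getD (pvFirst (pvWord s j)) 0 + 1))
    else (j, f)

-- outer 'while j < n' loop of A, state (c, i, j, f); fuel as above
def pvA_loop (s : List String) (n : Int) :
    Nat → Int → Int → Int → PySem.Dict Char Int → Int
  | 0, c, _, _, _ => c
  | fuel + 1, c, i, j, f =>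
    if j < n then
      if 1 < pvLen (pvWord s i) ∧ 1 < pvLen (pvWord s j) then
        pvA_loop s n fuel (c + (if pvLast (pvWord s i) ≠ pvFirst (pvWord s j) then 1 else 0))
          (i + 1) (j + 1) f
      else
        let f1 := f.insert (pvLast (pvWord s i)) 1
        let r := pvA_collect s n fuel j f1
        let f2 := r.2.insert (pvFirst (pvWord s r.1)) (r.2.getD (pvFirst (pvWord s r.1)) 0 + 1)
        pvA_loop s n fuel (c + (r.1 - i + 1) - (PySem.List.max? f2.values (fun v => v)).getD 0)
          r.1 (r.1 + 1) PySem.Dict.empty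
    else c

def stringChainReplacements (s : List String) : Int :=
  let n : Int := s.length
  if n ≤ 1 then 0
  else pvA_loop s n s.length 0 0 1 PySem.Dict.empty

-- ===== PORT B =====
-- 'while k + 1 < n and len(s[k]) <= 1: k += 1' of Source B (fuel guards totality only)
def pvFindK (s : List String) : Nat → Int → Int
  | 0, k => k
  | fuel + 1, k =>
    if k + 1 < (s.length : Int) ∧ pvLen (pvWord s k) ≤ 1 then pvFindK s fuel (k + 1) else k

-- one iteration of 'for i in reversed(range(n - 1))': fill res[i] from entries right of i
def pvB_body (s : List String) (res : List Int) (i : Int) : List Int :=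
  if 1 < pvLen (pvWord s i) ∧ 1 < pvLen (pvWord s (i + 1)) then
    PySem.List.pySetD res i
      ((if pvLast (pvWord s i) ≠ pvFirst (pvWord s (i + 1)) then 1 else 0) +
        PySem.List.pyGetD res (i + 1) 0)
  else
    let k := pvFindK s s.length (i + 1)
    let chars := pvLast (pvWord s i) ::
      (PySem.List.slice s (some (i + 1)) (some (k + 1))).map pvFirst
    PySem.List.pySetD res i
      (((chars.length : Int) -
        (PySem.List.max? ((PySem.Set.ofList chars).map (fun c => (chars.count c : Int)))
          (fun v => v)).getD 0) + PySem.List.pyGetD res k 0)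

def stringChainReplacements_alt (s : List String) : Int :=
  let n : Int := s.length
  let res := ((PySem.List.pyRange 0 (n - 1) 1).reverse).foldl (pvB_body s)
    (List.replicate n.toNat 0)
  if s = [] then 0 else PySem.List.pyGetD res 0 0

-- ===== PRECONDITION & SPEC =====
-- Pre_ excludes exactly the inputs where A raises IndexError: a list of two or more
-- words containing an empty string (s[i][-1] / s[j][0] on "").
def Pre_stringChainReplacements (s : List String) : Prop :=
  s.length ≤ 1 ∨ ∀ w ∈ s, w ≠ ""
instance (s : List String) : Decidable (Pre_stringChainReplacements s) := by
  unfold Pre_stringChainReplacements; infer_instance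

def pvWitness_stringChainReplacements : List String := ["ab", "c", "de"]

def Spec_stringChainReplacements (s : List String) (out : Int) : Prop :=
  out = stringChainReplacements_alt s
instance (s : List String) (out : Int) : Decidable (Spec_stringChainReplacements s out) := by
  unfold Spec_stringChainReplacements; infer_instance

-- ===== CLAIM (what is proved, stated in full; the proofs are below) =====
def Claim_equal_stringChainReplacements : Prop :=
  ∀ (s : List String), Dom_stringChainReplacements s → Pre_stringChainReplacements s →
    Spec_stringChainReplacements s (stringChainReplacements s)

-- ===== LEMMAS AND PROOFS =====

-- total += len(keys) - max(counts) : the reference group score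
def pvFlush (ks : List Char) : Int :=
  (ks.length : Int) -
    (PySem.List.max? (ks.map (fun k => (ks.count k : Int))) (fun v => v)).getD 0

-- reference state machine both ports are reduced to: pvGN = normal mode on the
-- remaining chain, pvGC = collecting mode with key multiset ks, current word w, rest r
mutual
def pvGN : List String → Int → Int
  | [], c => c
  | [_], c => c
  | a :: b :: r, c =>
    if 1 < pvLen a ∧ 1 < pvLen b then
      pvGN (b :: r) (c + (if pvLast a ≠ pvFirst b then 1 else 0))
    else pvGC [pvLast a] b r c
  termination_by l _ => (l.length, 1)
def pvGC : List Char → String → List String → Int → Int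
  | ks, w, [], c => c + pvFlush (ks ++ [pvFirst w])
  | ks, w, y :: t, c =>
    if 1 < pvLen w then pvGN (w :: y :: t) (c + pvFlush (ks ++ [pvFirst w]))
    else pvGC (ks ++ [pvFirst w]) y t c
  termination_by _ _ r _ => (r.length + 2, 0)
end

-- the short-run a group consumes: collected first chars, and the suffix from the terminator
def pvRunSplit : List String → List Char × List String
  | [] => ([], [])
  | [x] => ([], [x])
  | x :: y :: r =>
    if pvLen x ≤ 1 then
      (pvFirst x :: (pvRunSplit (y :: r)).1, (pvRunSplit (y :: r)).2)
    else ([], x :: y :: r)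

theorem pvRunSplit_snd (l : List String) : (pvRunSplit l).2 = l.drop (pvRunSplit l).1.length := by
  fun_induction pvRunSplit l with
  | case1 => simp [pvRunSplit]
  | case2 x => simp [pvRunSplit]
  | case3 x y r h ih => simp [pvRunSplit, h, ih]
  | case4 x y r h => simp [pvRunSplit, h]

theorem pvRunSplit_fst (l : List String) :
    (pvRunSplit l).1 = (l.take (pvRunSplit l).1.length).map pvFirst := by
  fun_induction pvRunSplit l with
  | case1 => simp [pvRunSplit]
  | case2 x => simp [pvRunSplit]
  | case3 x y r h ih =>
    show pvFirst x :: (pvRunSplit (y :: r)).1 =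
      (List.take (pvFirst x :: (pvRunSplit (y :: r)).1).length (x :: y :: r)).map pvFirst
    simp only [List.length_cons, List.take_succ_cons, List.map_cons]
    exact congrArg (pvFirst x :: ·) ih
  | case4 x y r h => simp [pvRunSplit, h]

theorem pvRunSplit_snd_ne_nil (l : List String) (h : l ≠ []) : (pvRunSplit l).2 ≠ [] := by
  fun_induction pvRunSplit l with
  | case1 => simp at h
  | case2 x => simp
  | case3 x y r hx ih => simpa using ih (by simp)
  | case4 x y r hx => simp

theorem pvMax_eq (l1 l2 : List Int) (h1 : l1 ≠ []) (h2 : l2 ≠ [])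
    (hm : ∀ x, x ∈ l1 ↔ x ∈ l2) :
    (PySem.List.max? l1 (fun v => v)).getD 0 = (PySem.List.max? l2 (fun v => v)).getD 0 := by
  obtain ⟨m1, e1⟩ : ∃ m, PySem.List.max? l1 (fun v => v) = some m := by
    cases hq : PySem.List.max? l1 (fun v => v) with
    | none => exact absurd ((PySem.List.max?_eq_none_iff l1 _).1 hq) h1
    | some m => exact ⟨m, rfl⟩
  obtain ⟨m2, e2⟩ : ∃ m, PySem.List.max? l2 (fun v => v) = some m := by
    cases hq : PySem.List.max? l2 (fun v => v) with
    | none => exact absurd ((PySem.List.max?_eq_none_iff l2 _).1 hq) h2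
    | some m => exact ⟨m, rfl⟩
  have b1 := PySem.List.max?_isMax e1
  have b2 := PySem.List.max?_isMax e2
  have i1 := PySem.List.max?_mem e1
  have i2 := PySem.List.max?_mem e2
  simp only [e1, e2, Option.getD_some]
  exact le_antisymm (b2 m1 ((hm m1).1 i1)) (b1 m2 ((hm m2).2 i2))

-- A's dict max equals the reference count max over the same key multiset
theorem pvDictMax_eq(k0 : Char) (tl : List Char) :
    (PySem.List.max?
      ((tl.foldl (fun d x => d.insert x (d.getD x 0 + 1))
        ((PySem.Dict.empty : PySem.Dict Char Int).insert k0 1)).values) (fun v => v)).getD 0 =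
    (PySem.List.max? ((k0 :: tl).map (fun k => (((k0 :: tl).count k : Nat) : Int)))
      (fun v => v)).getD 0 := by
  set d0 : PySem.Dict Char Int := (PySem.Dict.empty : PySem.Dict Char Int).insert k0 1 with hd0
  set d := tl.foldl (fun d x => d.insert x (d.getD x 0 + 1)) d0 with hd
  have hk0 : d0.keys = [k0] := by
    simp [hd0, PySem.Dict.keys_insert_of_not_contains, PySem.Dict.contains_empty, PySem.Dict.keys_empty]
  have hnd0 : d0.keys.Nodup := by rw [hk0]; simp
  have hkeys : d.keys = PySem.Set.update d0.keys tl := PySem.Dict.keys_foldl_insert tl _ d0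
  have hnd : d.keys.Nodup := PySem.Dict.nodup_keys_foldl_insert tl _ d0 hnd0
  have hmemk : ∀ k, k ∈ d.keys ↔ k ∈ k0 :: tl := by
    intro k
    rw [hkeys]
    constructor
    · intro h
      rcases (PySem.Set.mem_update d0.keys tl k).1 h with h | h
      · rw [hk0] at h; simp at h; simp [h]
      · simp [h]
    · intro h
      apply (PySem.Set.mem_update d0.keys tl k).2
      rcases List.mem_cons.1 h with h | h
      · left; rw [hk0]; simp [h]
      · right; exact h
  have hgd : ∀ k, d.getD k 0 = (((k0 :: tl).count k : Nat) : Int) := by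
    intro k
    rw [hd, PySem.Dict.getD_foldl_insert_add_one]
    rw [hd0, PySem.Dict.getD_insert, PySem.Dict.getD_empty]
    rw [List.count_cons]
    by_cases h : k = k0
    · simp [h]; ring
    · simp [h, Ne.symm h]
  have hvals : d.values = d.keys.map (fun k => d.getD k 0) := PySem.Dict.values_eq_map_keys d hnd 0
  apply pvMax_eq
  · rw [hvals]
    intro hcon
    have : k0 ∈ d.keys := (hmemk k0).2 (by simp)
    rcases List.map_eq_nil_iff.1 hcon with h
    simp [h] at this
  · simp
  · intro x
    rw [hvals]
    simp only [List.mem_map]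
    constructor
    · rintro ⟨k, hk, rfl⟩
      exact ⟨k, (hmemk k).1 hk, (hgd k).symm⟩
    · rintro ⟨k, hk, rfl⟩
      exact ⟨k, (hmemk k).2 hk, (hgd k)⟩

-- B's set-based group score equals the reference score pvFlush
theorem pvSetMax_eq (ks : List Char) (h : ks ≠ []) :
    (ks.length : Int) -
      (PySem.List.max? ((PySem.Set.ofList ks).map (fun c => (ks.count c : Int)))
        (fun v => v)).getD 0 = pvFlush ks := by
  unfold pvFlush
  congr 1
  apply pvMax_eq
  · intro hcon
    rcases List.exists_mem_of_ne_nil ks h with ⟨x, hx⟩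
    have : x ∈ PySem.Set.ofList ks := (PySem.Set.mem_ofList ks x).2 hx
    rcases List.map_eq_nil_iff.1 hcon with h2
    simp [h2] at this
  · simpa using h
  · intro x
    simp only [List.mem_map, PySem.Set.mem_ofList]

theorem pvDrop_cons (s : List String) (j : Int) (h0 : 0 ≤ j) (h : j < (s.length : Int)) :
    s.drop j.toNat = pvWord s j :: s.drop (j.toNat + 1) := by
  have hj : j.toNat < s.length := by omega
  rw [List.drop_eq_getElem_cons hj]
  congr 1
  rw [pvWord]
  exact (PySem.List.pyGetD_eq_getElem s "" h0 h).symm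

theorem pvA_collect_spec (s : List String) : ∀ (fuel : Nat) (j : Int) (d : PySem.Dict Char Int),
    0 ≤ j → j < (s.length : Int) → ((s.length : Int) - j).toNat ≤ fuel →
    pvA_collect s (s.length : Int) fuel j d =
      (j + ((pvRunSplit (s.drop j.toNat)).1.length : Int),
       (pvRunSplit (s.drop j.toNat)).1.foldl (fun d x => d.insert x (d.getD x 0 + 1)) d) := by
  intro fuel
  induction fuel with
  | zero => intro j d h0 hn hf; omega
  | succ fuel ih =>
    intro j d h0 hn hf
    rw [pvA_collect]
    by_cases h : j + 1 < (s.length : Int) ∧ pvLen (pvWord s j) ≤ 1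
    · rw [if_pos h]
      obtain ⟨hcap, hshort⟩ := h
      have hd := pvDrop_cons s j h0 hn
      have hd2 := pvDrop_cons s (j + 1) (by omega) hcap
      have h1 : (j + 1).toNat = j.toNat + 1 := by omega
      rw [h1] at hd2
      have hrun : pvRunSplit (s.drop j.toNat) =
          (pvFirst (pvWord s j) :: (pvRunSplit (s.drop (j + 1).toNat)).1,
           (pvRunSplit (s.drop (j + 1).toNat)).2) := by
        rw [h1, hd, hd2]
        simp [pvRunSplit, hshort]
      rw [ih (j + 1) _ (by omega) hcap (by omega), hrun, Prod.ext_iff]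
      refine ⟨by simp; push_cast; ring, by simp⟩
    · rw [if_neg h]
      have hd := pvDrop_cons s j h0 hn
      have hrun : (pvRunSplit (s.drop j.toNat)).1 = [] := by
        by_cases hcap : j + 1 < (s.length : Int)
        · have hlong : ¬ (pvLen (pvWord s j) ≤ 1) := by tauto
          have hd2 := pvDrop_cons s (j + 1) (by omega) hcap
          have h1 : (j + 1).toNat = j.toNat + 1 := by omega
          rw [h1] at hd2
          rw [hd, hd2]
          simp [pvRunSplit, hlong]
        · have hlen : s.length = j.toNat + 1 := by omega
          have : s.drop (j.toNat + 1) = [] := by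
            apply List.drop_eq_nil_of_le; omega
          rw [hd, this, pvRunSplit]
      rw [hrun]
      simp

theorem pvGC_eq_run (r : List String) : ∀ (w : String) (ks : List Char) (c : Int),
    pvGC ks w r c =
      pvGN (pvRunSplit (w :: r)).2
        (c + pvFlush (ks ++ (pvRunSplit (w :: r)).1 ++
          [pvFirst ((pvRunSplit (w :: r)).2.headD "")])) := by
  induction r with
  | nil => intro w ks c; simp [pvGC, pvGN, pvRunSplit]
  | cons y t ih =>
    intro w ks c
    by_cases hw : 1 < pvLen w
    · have hw' : ¬ (pvLen w ≤ 1) := by omega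
      simp [pvGC, pvRunSplit, hw, hw', pvGN]
    · have hw' : pvLen w ≤ 1 := by omega
      simp [pvGC, pvRunSplit, hw, hw', ih]

theorem pvA_loop_eq (s : List String) : ∀ (fuel : Nat) (i c : Int), 0 ≤ i →
    ((s.length : Int) - i).toNat ≤ fuel →
    pvA_loop s (s.length : Int) fuel c i (i + 1) PySem.Dict.empty = pvGN (s.drop i.toNat) c := by
  intro fuel
  induction fuel with
  | zero =>
    intro i c h0 hm
    rw [pvA_loop, List.drop_eq_nil_of_le (by omega)]
    simp [pvGN]
  | succ m ih =>
    intro i c h0 hm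
    by_cases hj : i + 1 < (s.length : Int)
    case neg =>
      rw [pvA_loop, if_neg hj]
      cases hD : s.drop i.toNat with
      | nil => simp [pvGN]
      | cons a t =>
        have ht : t = [] := by
          have := congrArg List.length hD
          simp at this
          cases t with
          | nil => rfl
          | cons b r => simp at this; omega
        rw [ht]
        simp [pvGN]
    case pos =>
      have hi : i < (s.length : Int) := by omega
      have hd1 := pvDrop_cons s i h0 hi
      have hd2 := pvDrop_cons s (i + 1) (by omega) hj
      have h1 : (i + 1).toNat = i.toNat + 1 := by omega
      rw [h1] at hd2
      by_cases hlong : 1 < pvLen (pvWord s i) ∧ 1 < pvLen (pvWord s (i + 1))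
      · rw [pvA_loop, if_pos hj, if_pos hlong,
          ih (i + 1) _ (by omega) (by omega), h1, hd1, hd2]
        simp [pvGN, hlong]
      · rw [pvA_loop, if_pos hj]
        rw [if_neg hlong]
        have hcol := pvA_collect_spec s m (i + 1)
          ((PySem.Dict.empty : PySem.Dict Char Int).insert (pvLast (pvWord s i)) 1)
          (by omega) hj (by omega)
        simp only [hcol]
        rw [h1]
        set R1 := (pvRunSplit (s.drop (i.toNat + 1))).1 with hR1
        set R2 := (pvRunSplit (s.drop (i.toNat + 1))).2 with hR2
        set k0 := pvLast (pvWord s i) with hk0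
        set r1 : Int := i + 1 + (R1.length : Int) with hr1
        have hne : s.drop (i.toNat + 1) ≠ [] := by rw [hd2]; simp
        have hR2ne : R2 ≠ [] := pvRunSplit_snd_ne_nil _ hne
        have hsnd : R2 = (s.drop (i.toNat + 1)).drop R1.length := by
          rw [hR2, hR1]; exact pvRunSplit_snd _
        have hdropr1 : s.drop r1.toNat = R2 := by
          rw [hsnd, List.drop_drop]; congr 1; omega
        have hr1n : r1 < (s.length : Int) := by
          have hxx : s.drop r1.toNat ≠ [] := by rw [hdropr1]; exact hR2ne
          have h2 : r1.toNat < s.length := by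
            by_contra hcon
            push_neg at hcon
            exact hxx (List.drop_eq_nil_of_le hcon)
          omega
        have hdr1 := pvDrop_cons s r1 (by omega) hr1n
        rw [hdropr1] at hdr1
        have hterm : R2.headD "" = pvWord s r1 := by rw [hdr1]; rfl
        have hf2 : ((R1.foldl (fun d x => d.insert x (d.getD x 0 + 1))
              ((PySem.Dict.empty : PySem.Dict Char Int).insert k0 1)).insert (pvFirst (pvWord s r1))
              ((R1.foldl (fun d x => d.insert x (d.getD x 0 + 1))
                ((PySem.Dict.empty : PySem.Dict Char Int).insert k0 1)).getD (pvFirst (pvWord s r1)) 0 + 1))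
            = (R1 ++ [pvFirst (pvWord s r1)]).foldl (fun d x => d.insert x (d.getD x 0 + 1))
              ((PySem.Dict.empty : PySem.Dict Char Int).insert k0 1) := by
          simp [List.foldl_append]
        rw [hf2]
        rw [pvDictMax_eq k0 (R1 ++ [pvFirst (pvWord s r1)])]
        rw [ih r1 _ (by omega) (by omega), hdropr1]
        rw [hd1, hd2]
        have hGN : pvGN (pvWord s i :: pvWord s (i + 1) :: s.drop (i.toNat + 1 + 1)) c
            = pvGC [k0] (pvWord s (i + 1)) (s.drop (i.toNat + 1 + 1)) c := by
          simp [pvGN, hlong]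
          rw [hk0]
        rw [hGN, pvGC_eq_run, ← hd2, ← hR1, ← hR2, hterm]
        congr 1
        simp [pvFlush]
        push_cast
        ring_nf
        omega

-- Source B's k-search finds exactly 1 + the length of the collected short run
theorem pvFindK_spec (s : List String) : ∀ (fuel : Nat) (j : Int),
    0 ≤ j → j < (s.length : Int) → ((s.length : Int) - j).toNat ≤ fuel →
    pvFindK s fuel j = j + ((pvRunSplit (s.drop j.toNat)).1.length : Int) := by
  intro fuel
  induction fuel with
  | zero => intro j h0 hn hf; omega
  | succ fuel ih =>
    intro j h0 hn hf
    rw [pvFindK]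
    by_cases h : j + 1 < (s.length : Int) ∧ pvLen (pvWord s j) ≤ 1
    · rw [if_pos h]
      obtain ⟨hcap, hshort⟩ := h
      have hd := pvDrop_cons s j h0 hn
      have hd2 := pvDrop_cons s (j + 1) (by omega) hcap
      have h1 : (j + 1).toNat = j.toNat + 1 := by omega
      rw [h1] at hd2
      have hrun : (pvRunSplit (s.drop j.toNat)).1 =
          pvFirst (pvWord s j) :: (pvRunSplit (s.drop (j + 1).toNat)).1 := by
        rw [h1, hd, hd2]
        simp [pvRunSplit, hshort]
      rw [ih (j + 1) (by omega) hcap (by omega), hrun]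
      simp
      push_cast
      ring
    · rw [if_neg h]
      have hd := pvDrop_cons s j h0 hn
      have hrun : (pvRunSplit (s.drop j.toNat)).1 = [] := by
        by_cases hcap : j + 1 < (s.length : Int)
        · have hlong : ¬ (pvLen (pvWord s j) ≤ 1) := by tauto
          have hd2 := pvDrop_cons s (j + 1) (by omega) hcap
          have h1 : (j + 1).toNat = j.toNat + 1 := by omega
          rw [h1] at hd2
          rw [hd, hd2]
          simp [pvRunSplit, hlong]
        · have : s.drop (j.toNat + 1) = [] := by
            apply List.drop_eq_nil_of_le; omega
          rw [hd, this, pvRunSplit]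
      rw [hrun]
      simp

-- pvGN is affine in its accumulator
theorem pvGN_add (N : Nat) : ∀ (l : List String), l.length ≤ N → ∀ (a b : Int),
    pvGN l (a + b) = a + pvGN l b := by
  induction N with
  | zero =>
    intro l hl a b
    have : l = [] := List.eq_nil_of_length_eq_zero (by omega)
    subst this
    simp [pvGN]
  | succ N ih =>
    intro l hl a b
    match l with
    | [] => simp [pvGN]
    | [x] => simp [pvGN]
    | x :: y :: r =>
      by_cases h : 1 < pvLen x ∧ 1 < pvLen y
      · rw [pvGN, if_pos h, pvGN, if_pos h]
        generalize (if pvLast x ≠ pvFirst y then (1 : Int) else 0) = M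
        rw [show a + b + M = a + (b + M) from by ring]
        exact ih (y :: r) (by simp at hl ⊢; omega) a (b + M)
      · rw [pvGN, if_neg h, pvGN, if_neg h, pvGC_eq_run, pvGC_eq_run]
        generalize pvFlush ([pvLast x] ++ (pvRunSplit (y :: r)).1 ++
          [pvFirst ((pvRunSplit (y :: r)).2.headD "")]) = F
        rw [show a + b + F = a + (b + F) from by ring]
        apply ih
        rw [pvRunSplit_snd]
        simp at hl ⊢
        omega

-- pvB_body writes only index i and keeps the length
theorem pvB_body_length (s : List String) (res : List Int) (i : Int) :
    (pvB_body s res i).length = res.length := by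
  unfold pvB_body
  split <;> simp [PySem.List.length_pySetD]

theorem pvB_body_get_ne (s : List String) (res : List Int) (m j : Nat)
    (hm : m < res.length) (hne : j ≠ m) :
    PySem.List.pyGetD (pvB_body s res (m : Int)) (j : Int) 0 =
      PySem.List.pyGetD res (j : Int) 0 := by
  have key : ∀ (v : Int), PySem.List.pyGetD (PySem.List.pySetD res ((m : Nat) : Int) v) ((j : Nat) : Int) 0
      = if j = m then v else PySem.List.pyGetD res ((j : Nat) : Int) 0 :=
    fun v => PySem.List.pyGetD_pySetD_natCast res m j v 0 hm
  unfold pvB_body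
  split <;> simp only [key, if_neg hne]

-- the value pvB_body writes at index m is the answer for the suffix s[m:]
theorem pvStep (s : List String) (res : List Int) (m : Nat)
    (hm : (m : Int) + 1 < (s.length : Int))
    (hlen : res.length = s.length)
    (hres : ∀ j : Nat, m < j → j < s.length →
      PySem.List.pyGetD res (j : Int) 0 = pvGN (s.drop j) 0) :
    PySem.List.pyGetD (pvB_body s res (m : Int)) (m : Int) 0 = pvGN (s.drop m) 0 := by
  have hmlen : m < res.length := by omega
  have hd1 := pvDrop_cons s (m : Int) (by positivity) (by omega)
  have hd2 := pvDrop_cons s ((m : Int) + 1) (by positivity) hm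
  rw [show ((m : Int)).toNat = m from by omega] at hd1
  rw [show ((m : Int) + 1).toNat = m + 1 from by omega] at hd2
  have key : ∀ (v : Int), PySem.List.pyGetD (PySem.List.pySetD res ((m : Nat) : Int) v) ((m : Nat) : Int) 0 = v :=
    fun v => by rw [PySem.List.pyGetD_pySetD_natCast res m m v 0 hmlen, if_pos rfl]
  by_cases hlong : 1 < pvLen (pvWord s (m : Int)) ∧ 1 < pvLen (pvWord s ((m : Int) + 1))
  · unfold pvB_body
    rw [if_pos hlong]
    rw [key]
    have hres1 : PySem.List.pyGetD res ((m : Int) + 1) 0 = pvGN (s.drop (m + 1)) 0 := by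
      have h := hres (m + 1) (by omega) (by omega)
      rwa [show ((m + 1 : Nat) : Int) = (m : Int) + 1 from by push_cast; ring] at h
    rw [hres1, hd1, hd2, pvGN, if_pos hlong, ← hd2]
    rw [show (0 : Int) + (if pvLast (pvWord s (m : Int)) ≠ pvFirst (pvWord s ((m : Int) + 1))
      then (1 : Int) else 0) = (if pvLast (pvWord s (m : Int)) ≠ pvFirst (pvWord s ((m : Int) + 1))
      then (1 : Int) else 0) + 0 from by ring]
    rw [pvGN_add (s.drop (m + 1)).length (s.drop (m + 1)) le_rfl]
  · unfold pvB_body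
    rw [if_neg hlong]
    simp only [key]
    set R1 := (pvRunSplit (s.drop (m + 1))).1 with hR1
    set R2 := (pvRunSplit (s.drop (m + 1))).2 with hR2
    have hlne : s.drop (m + 1) ≠ [] := by rw [hd2]; simp
    have hR2ne : R2 ≠ [] := pvRunSplit_snd_ne_nil _ hlne
    have hsnd : R2 = (s.drop (m + 1)).drop R1.length := pvRunSplit_snd _
    -- the k-search lands on the run's terminator
    have hkval : pvFindK s s.length ((m : Int) + 1) = ((m : Int) + 1) + (R1.length : Int) := by
      have h3 := pvFindK_spec s s.length ((m : Int) + 1) (by positivity) hm (by omega)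
      rwa [show ((m : Int) + 1).toNat = m + 1 from by omega, ← hR1] at h3
    have hkd : s.drop (m + 1 + R1.length) = R2 := by
      rw [hsnd, List.drop_drop]
      try congr 1
      try omega
    have hkn : ((m : Int) + 1) + (R1.length : Int) < (s.length : Int) := by
      have hxx : s.drop (m + 1 + R1.length) ≠ [] := by rw [hkd]; exact hR2ne
      have : m + 1 + R1.length < s.length := by
        by_contra hcon
        push_neg at hcon
        exact hxx (List.drop_eq_nil_of_le hcon)
      omega
    have hdrk := pvDrop_cons s (((m : Int) + 1) + (R1.length : Int)) (by positivity) hkn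
    rw [show (((m : Int) + 1) + (R1.length : Int)).toNat = m + 1 + R1.length from by omega,
      hkd] at hdrk
    have hterm : R2.headD "" = pvWord s (((m : Int) + 1) + (R1.length : Int)) := by
      rw [hdrk]; rfl
    have hidx : R1.length < (s.drop (m + 1)).length := by
      by_contra hcon
      push_neg at hcon
      exact hR2ne (by rw [hsnd]; exact List.drop_eq_nil_of_le hcon)
    -- the chars list is the reference key multiset
    have hchars : pvLast (pvWord s (m : Int)) ::
        (PySem.List.slice s (some ((m : Int) + 1))
          (some (pvFindK s s.length ((m : Int) + 1) + 1))).map pvFirst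
        = pvLast (pvWord s (m : Int)) :: (R1 ++ [pvFirst (R2.headD "")]) := by
      try congr 1
      rw [hkval, PySem.List.slice_toNat _ (by positivity) (by positivity)]
      rw [show (((m : Int) + 1) + (R1.length : Int) + 1).toNat - ((m : Int) + 1).toNat
        = 1 + R1.length from by omega,
        show ((m : Int) + 1).toNat = m + 1 from by omega]
      have htake : (s.drop (m + 1)).take (1 + R1.length)
          = (s.drop (m + 1)).take R1.length ++ [R2.headD ""] := by
        rw [Nat.add_comm]
        rw [List.take_succ]
        congr 1
        rw [List.getElem?_eq_getElem hidx, Option.toList_some]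
        have hx2 : (s.drop (m + 1))[R1.length] :: (s.drop (m + 1)).drop (R1.length + 1)
            = (s.drop (m + 1)).drop R1.length :=
          (List.drop_eq_getElem_cons hidx).symm
        rw [← hsnd] at hx2
        have hterm2 : R2 = R2.headD "" :: R2.tail := by
          cases hc : R2 with
          | nil => exact absurd hc hR2ne
          | cons z zs => simp
        conv at hx2 => rw [hterm2]
        exact congrArg (fun z => [z]) (List.cons.injEq _ _ _ _ ▸ hx2).1
      rw [htake, List.map_append]
      try congr 1
      · rw [hR1]
        exact (pvRunSplit_fst (s.drop (m + 1))).symm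
    rw [hchars]
    -- the looked-up table entry is the answer for the suffix after the group
    have hresk : PySem.List.pyGetD res (pvFindK s s.length ((m : Int) + 1)) 0 = pvGN R2 0 := by
      rw [hkval, show ((m : Int) + 1) + (R1.length : Int) = ((m + 1 + R1.length : Nat) : Int)
        from by push_cast; ring]
      rw [hres (m + 1 + R1.length) (by omega) (by omega), hkd]
    rw [hresk]
    -- reduce pvGN on the left via the group rule
    rw [hd1, hd2, pvGN, if_neg hlong]
    rw [pvGC_eq_run, ← hd2, ← hR1, ← hR2]
    have hcost := pvSetMax_eq (pvLast (pvWord s (m : Int)) :: (R1 ++ [pvFirst (R2.headD "")]))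
      (by simp)
    rw [hcost]
    rw [show (0 : Int) + pvFlush ([pvLast (pvWord s (m : Int))] ++ R1 ++ [pvFirst (R2.headD "")])
      = pvFlush ([pvLast (pvWord s (m : Int))] ++ R1 ++ [pvFirst (R2.headD "")]) + 0
      from by ring]
    rw [pvGN_add R2.length R2 le_rfl]
    congr 2 <;> simp

-- the whole back-to-front fill leaves every entry equal to its suffix answer
theorem pvTab (s : List String) : ∀ (m : Nat) (res : List Int),
    (m : Int) ≤ (s.length : Int) - 1 →
    res.length = s.length →
    (∀ j : Nat, m ≤ j → j < s.length →
      PySem.List.pyGetD res (j : Int) 0 = pvGN (s.drop j) 0) →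
    ∀ j : Nat, j < s.length →
      PySem.List.pyGetD
        ((PySem.List.pyRange 0 (m : Int) 1).foldr (fun i acc => pvB_body s acc i) res)
        (j : Int) 0 = pvGN (s.drop j) 0 := by
  intro m
  induction m with
  | zero =>
    intro res _ _ hres j hj
    rw [show ((0 : Nat) : Int) = 0 from rfl, PySem.List.pyRange_one_eq_nil le_rfl]
    exact hres j (Nat.zero_le j) hj
  | succ m ih =>
    intro res hm1 hlen hres j hj
    rw [show ((m + 1 : Nat) : Int) = (m : Int) + 1 from by push_cast; ring]
    rw [PySem.List.pyRange_one_succ_right (by positivity), List.foldr_append]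
    simp only [List.foldr_cons, List.foldr_nil]
    apply ih (pvB_body s res (m : Int)) (by omega)
      (by rw [pvB_body_length, hlen])
    · intro j' hmj' hj'
      by_cases hje : j' = m
      · subst hje
        exact pvStep s res j' (by push_cast at hm1; omega) hlen
          (fun j'' h1 h2 => hres j'' (by omega) h2)
      · rw [pvB_body_get_ne s res m j' (by omega) hje]
        exact hres j' (by omega) hj'
    · exact hj

-- ===== VERDICT (by name: the statement is the Claim_ definition above) =====
theorem stringChainReplacements_spec : Claim_equal_stringChainReplacements := by
  intro s _hdom _hpre
  unfold Spec_stringChainReplacements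
  unfold stringChainReplacements stringChainReplacements_alt
  by_cases hn : (s.length : Int) ≤ 1
  · rw [if_pos hn]
    cases s with
    | nil => simp
    | cons a t =>
      have ht : t = [] := by
        cases t with
        | nil => rfl
        | cons b r => simp at hn; omega
      subst ht
      simp [PySem.List.pyRange_one_eq_nil, PySem.List.pyGetD]
  · rw [if_neg hn]
    have hA := pvA_loop_eq s s.length 0 0 (le_refl 0) (by simp)
    simp only [zero_add, Int.toNat_zero, List.drop_zero] at hA
    rw [hA]
    have hne : s ≠ [] := by intro h; subst h; simp at hn
    rw [if_neg hne]
    have hm1 : ((s.length : Int)) - 1 = ((s.length - 1 : Nat) : Int) := by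
      have : 1 ≤ s.length := by omega
      omega
    rw [show ((s.length : Int)).toNat = s.length from by omega, hm1, List.foldl_reverse]
    have hlast : ∀ j : Nat, s.length - 1 ≤ j → j < s.length →
        PySem.List.pyGetD (List.replicate s.length (0 : Int)) (j : Int) 0
          = pvGN (s.drop j) 0 := by
      intro j h1 h2
      have hj : j = s.length - 1 := by omega
      have hd : ∃ w, s.drop j = [w] := by
        have hlen1 : (s.drop j).length = 1 := by simp; omega
        cases hD : s.drop j with
        | nil => rw [hD] at hlen1; simp at hlen1
        | cons w t =>
          rw [hD] at hlen1
          simp at hlen1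
          exact ⟨w, by simp [hlen1]⟩
      obtain ⟨w, hw⟩ := hd
      rw [hw]
      rw [PySem.List.pyGetD_eq_getElem _ _ (by positivity) (by simp; omega)]
      simp [pvGN]
    have := pvTab s (s.length - 1) (List.replicate s.length 0) (by omega)
      (by simp) hlast 0 (by omega)
    rw [show ((0 : Nat) : Int) = 0 from rfl] at this
    rw [this, List.drop_zero]
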